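-- pv_equiv track=rewrite | github.com/Gribachella/pygen-labs | password_generator(1.2a).py | get_uniq_charsets
-- ===== SOURCE A (Python) =====
-- def get_uniq_charsets(charset, user_charset):
--     combine = [i.copy() for i in charset] + [j.copy() for j in user_charset]
--     uniq_charsets = []
--
--     for i in range(len(combine)):
--         uniq_chars = []
--
--         for j in combine[i]:
--             if j not in uniq_chars:
--                 uniq_chars.append(j)
--
--             for k in range(i + 1, len(combine)):
--                 combine[k] = [m for m in combine[k] if m != j]
--
--         uniq_charsets.append(uniq_chars.copy())
--
--     while [] in uniq_charsets:
--         uniq_charsets.remove([])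
--
--     return uniq_charsets
-- ===== SOURCE B (Python) =====
-- def get_uniq_charsets(charset, user_charset):
--     combine = [list(inner) for inner in charset] + [list(inner) for inner in user_charset]
--     first_owner = {}
--     for idx, inner in enumerate(combine):
--         for ch in inner:
--             if ch not in first_owner:
--                 first_owner[ch] = idx
--     result = []
--     for idx, inner in enumerate(combine):
--         group = [ch for ch in dict.fromkeys(inner) if first_owner[ch] == idx]
--         if group:
--             result.append(group)
--     return result
-- ===== Notes on version B (the rewrite author's own statement) =====
-- stated objective: faster
-- what changed: A's nested loops repeatedly rebuild every later charset to delete each seen character (cubic in total size); B makes one pass building a first-owner dict mapping each character to the first combined charset containing it, then filters each charset's ordered-unique characters by owner, dropping empty groups.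
import Mathlib
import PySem

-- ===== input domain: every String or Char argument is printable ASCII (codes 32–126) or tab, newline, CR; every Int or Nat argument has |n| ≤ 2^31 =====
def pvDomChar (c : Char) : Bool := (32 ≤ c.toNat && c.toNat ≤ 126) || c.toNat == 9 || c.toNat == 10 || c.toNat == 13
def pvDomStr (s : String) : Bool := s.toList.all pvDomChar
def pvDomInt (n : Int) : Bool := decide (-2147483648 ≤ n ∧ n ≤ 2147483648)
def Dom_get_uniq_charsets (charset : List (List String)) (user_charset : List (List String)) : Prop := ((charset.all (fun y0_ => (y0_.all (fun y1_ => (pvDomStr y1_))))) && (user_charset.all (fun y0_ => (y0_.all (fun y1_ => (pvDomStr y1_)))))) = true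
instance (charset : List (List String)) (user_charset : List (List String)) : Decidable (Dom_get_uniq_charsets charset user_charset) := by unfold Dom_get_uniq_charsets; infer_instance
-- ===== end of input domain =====

-- B replaces A's quadratic nested removal from later charsets by a single first-owner
-- table built in one pass, then a per-charset ordered-unique filter (alternative decomposition).

-- ===== PORT A =====
-- inner 'for j in combine[i]' loop: updates uniq_chars and filters j out of all later lists
def pyAStep (uniq : List String) (js : List String) (rest : List (List String)) :
    List String × List (List String) :=
  match js with
  | [] => (uniq, rest)
  | j :: js' =>
      let uniq' := if j ∈ uniq then uniq else uniq ++ [j]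
      let rest' := rest.map (fun l => l.filter (fun m => m ≠ j))
      pyAStep uniq' js' rest'

theorem pyAStep_snd_length (js : List String) (uniq : List String) (rest : List (List String)) :
    (pyAStep uniq js rest).2.length = rest.length := by
  induction js generalizing uniq rest with
  | nil => simp [pyAStep]
  | cons j js ih => simp [pyAStep, ih]

-- outer 'for i in range(len(combine))' loop: combine[i] is read, only later entries mutate
def pyALoop : List (List String) → List (List String)
  | [] => []
  | cur :: rest =>
      let r := pyAStep [] cur rest
      r.1 :: pyALoop r.2
termination_by ls => ls.length
decreasing_by simp [pyAStep_snd_length]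

def get_uniq_charsets (charset : List (List String)) (user_charset : List (List String)) :
    List (List String) :=
  let combine := charset ++ user_charset
  let uniq_charsets := pyALoop combine
  -- 'while [] in uniq_charsets: uniq_charsets.remove([])' removes every empty list, order kept
  uniq_charsets.filter (fun x => x ≠ [])

-- ===== PORT B =====
-- one pass over all combined charsets: first_owner[ch] = index of first charset containing ch
def bOwner (combine : List (List String)) : PySem.Dict String Int :=
  (PySem.List.enumerate combine).foldl
    (fun d p => p.2.foldl (fun d ch => if d.contains ch then d else d.insert ch p.1) d)
    PySem.Dict.empty

def get_uniq_charsets_alt (charset : List (List String)) (user_charset : List (List String)) :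
    List (List String) :=
  let combine := charset ++ user_charset
  let owner := bOwner combine
  (PySem.List.enumerate combine).foldl
    (fun acc p =>
      let group := (PySem.List.dedup p.2).filter (fun ch => owner.get? ch == some p.1)
      if group ≠ [] then acc ++ [group] else acc)
    []

-- ===== PRECONDITION & SPEC =====
def Spec_get_uniq_charsets (charset : List (List String)) (user_charset : List (List String)) (out : List (List String)) : Prop := out = get_uniq_charsets_alt charset user_charset
instance (charset : List (List String)) (user_charset : List (List String)) (out : List (List String)) : Decidable (Spec_get_uniq_charsets charset user_charset out) := by unfold Spec_get_uniq_charsets; infer_instance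

-- ===== CLAIM (what is proved, stated in full; the proofs are below) =====
def Claim_equal_get_uniq_charsets : Prop := ∀ (charset : List (List String)) (user_charset : List (List String)), Dom_get_uniq_charsets charset user_charset → Spec_get_uniq_charsets charset user_charset (get_uniq_charsets charset user_charset)

-- ===== LEMMAS AND PROOFS =====

-- first index (from s) of the charset containing ch, if any
def firstIdxFrom (s : Int) : List (List String) → String → Option Int
  | [], _ => none
  | l :: ls, ch => if ch ∈ l then some s else firstIdxFrom (s + 1) ls ch

theorem filter_filter_cons (l : List String) (j : String) (js : List String) :
    (l.filter (fun m => m ≠ j)).filter (fun m => decide (m ∉ js))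
      = l.filter (fun m => decide (m ∉ j :: js)) := by
  simp only [List.filter_filter]
  apply List.filter_congr
  intro m _
  by_cases h1 : m = j <;> by_cases h2 : m ∈ js <;> simp [h1, h2]

theorem pyAStep_eq (js : List String) (uniq : List String) (rest : List (List String)) :
    pyAStep uniq js rest =
      (js.foldl PySem.Set.add uniq,
       rest.map (fun l => l.filter (fun m => decide (m ∉ js)))) := by
  induction js generalizing uniq rest with
  | nil => simp [pyAStep]
  | cons j js ih =>
      rw [pyAStep, ih]
      refine Prod.ext ?_ ?_
      · show List.foldl _ (if j ∈ uniq then uniq else uniq ++ [j]) js = _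
        simp only [List.foldl_cons]
        congr 1
        simp [PySem.Set.add, PySem.Set.contains]
      · show List.map _ (List.map _ rest) = _
        rw [List.map_map]
        apply List.map_congr_left
        intro l _
        exact filter_filter_cons l j js

theorem filter_add (acc : List String) (x : String) (p : String → Bool) :
    (PySem.Set.add acc x).filter p
      = if p x then PySem.Set.add (acc.filter p) x else acc.filter p := by
  by_cases hm : x ∈ acc <;> by_cases hp : p x <;>
    simp [PySem.Set.add, PySem.Set.contains, hm, hp, List.mem_filter]

theorem filter_foldl_add (xs : List String) (acc : List String) (p : String → Bool) :
    (xs.foldl PySem.Set.add acc).filter p = (xs.filter p).foldl PySem.Set.add (acc.filter p) := by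
  induction xs generalizing acc with
  | nil => rfl
  | cons x xs ih =>
      rw [List.foldl_cons, ih, filter_add]
      by_cases hp : p x <;> simp [hp]

theorem dedup_filter (l : List String) (p : String → Bool) :
    PySem.List.dedup (l.filter p) = (PySem.List.dedup l).filter p := by
  rw [PySem.List.dedup_eq_ofList, PySem.List.dedup_eq_ofList, PySem.Set.ofList_eq_foldl,
      PySem.Set.ofList_eq_foldl, filter_foldl_add]
  rfl

theorem firstIdxFrom_append_of_notmem (xs ys : List (List String)) (s : Int) (ch : String)
    (h : ∀ l ∈ xs, ch ∉ l) :
    firstIdxFrom s (xs ++ ys) ch = firstIdxFrom (s + xs.length) ys ch := by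
  induction xs generalizing s with
  | nil => simp
  | cons x xs ih =>
      have hx : ch ∉ x := h x (by simp)
      rw [List.cons_append, firstIdxFrom, if_neg hx, ih _ (fun l hl => h l (by simp [hl]))]
      congr 1
      simp only [List.length_cons]
      push_cast
      ring

theorem firstIdxFrom_lt (xs : List (List String)) (s : Int) (ch : String) (j : Int)
    (h : firstIdxFrom s xs ch = some j) : j < s + xs.length := by
  induction xs generalizing s with
  | nil => simp [firstIdxFrom] at h
  | cons x xs ih =>
      rw [firstIdxFrom] at h
      split at h
      · simp at h
        simp [← h]
      · have := ih (s + 1) h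
        simp only [List.length_cons]
        push_cast at this ⊢
        omega

theorem firstIdxFrom_append_left (xs ys : List (List String)) (s : Int) (ch : String) (j : Int)
    (h : firstIdxFrom s xs ch = some j) : firstIdxFrom s (xs ++ ys) ch = some j := by
  induction xs generalizing s with
  | nil => simp [firstIdxFrom] at h
  | cons x xs ih =>
      rw [firstIdxFrom] at h
      rw [List.cons_append, firstIdxFrom]
      split at h <;> rename_i hx
      · rw [if_pos hx]; exact h
      · rw [if_neg hx]; exact ih _ h

theorem firstIdxFrom_isSome_of_mem (xs : List (List String)) (s : Int) (ch : String)
    (h : ∃ l ∈ xs, ch ∈ l) : ∃ j, firstIdxFrom s xs ch = some j := by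
  induction xs generalizing s with
  | nil => simp at h
  | cons x xs ih =>
      rw [firstIdxFrom]
      by_cases hx : ch ∈ x
      · exact ⟨s, if_pos hx⟩
      · rw [if_neg hx]
        apply ih
        rcases h with ⟨l, hl, hc⟩
        rcases List.mem_cons.mp hl with rfl | hl
        · exact absurd hc hx
        · exact ⟨l, hl, hc⟩

theorem bOwner_inner (l : List String) (d : PySem.Dict String Int) (i : Int) (ch : String) :
    (l.foldl (fun d c => if d.contains c then d else d.insert c i) d).get? ch
      = if (d.get? ch).isSome then d.get? ch else if ch ∈ l then some i else none := by
  induction l generalizing d with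
  | nil => simp
  | cons c l ih =>
      rw [List.foldl_cons]
      by_cases hc : d.contains c
      · rw [if_pos hc, ih]
        by_cases he : ch = c
        · subst he
          rw [PySem.Dict.contains_eq_isSome_get?] at hc
          simp [hc]
        · simp [he]
      · rw [if_neg hc, ih, PySem.Dict.get?_insert]
        by_cases he : ch = c
        · subst he
          rw [PySem.Dict.contains_eq_isSome_get?] at hc
          simp [hc]
        · simp [he]

theorem bOwner_outer (ls : List (List String)) (s : Int) (d : PySem.Dict String Int) (ch : String) :
    ((PySem.List.enumerate ls s).foldl
      (fun d p => p.2.foldl (fun d ch => if d.contains ch then d else d.insert ch p.1) d) d).get? ch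
      = if (d.get? ch).isSome then d.get? ch else firstIdxFrom s ls ch := by
  induction ls generalizing s d with
  | nil => simp [PySem.List.enumerate_nil, firstIdxFrom]
  | cons l ls ih =>
      rw [PySem.List.enumerate_cons, List.foldl_cons, ih, bOwner_inner, firstIdxFrom]
      by_cases hd : (d.get? ch).isSome
      · simp [hd]
      · simp only [hd]
        by_cases hm : ch ∈ l <;> simp [hm]

theorem bOwner_get? (combine : List (List String)) (ch : String) :
    (bOwner combine).get? ch = firstIdxFrom 0 combine ch := by
  rw [bOwner, bOwner_outer]
  simp

-- the core transport: A's loop on the suffix ls, after the prefix pre has been processed,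
-- computes exactly B's per-index groups over the full list pre ++ ls
theorem main_transport (ls pre : List (List String)) :
    pyALoop (ls.map (fun l => l.filter (fun c => decide (c ∉ pre.flatten)))) =
      (PySem.List.enumerate ls (pre.length : Int)).map
        (fun p => (PySem.List.dedup p.2).filter
          (fun ch => firstIdxFrom 0 (pre ++ ls) ch == some p.1)) := by
  induction ls generalizing pre with
  | nil => simp [pyALoop, PySem.List.enumerate_nil]
  | cons cur rest ih =>
      rw [List.map_cons, pyALoop, PySem.List.enumerate_cons, List.map_cons]
      simp only [pyAStep_eq]
      congr 1
      · -- head group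
        have h1 : (cur.filter (fun c => decide (c ∉ pre.flatten))).foldl PySem.Set.add []
            = PySem.List.dedup (cur.filter (fun c => decide (c ∉ pre.flatten))) := by
          rw [PySem.List.dedup_eq_ofList, PySem.Set.ofList_eq_foldl]
        rw [h1, dedup_filter]
        apply List.filter_congr
        intro ch hch
        have hcur : ch ∈ cur := (PySem.List.mem_dedup _ _).mp hch
        by_cases hm : ch ∈ pre.flatten
        · obtain ⟨l, hl, hcl⟩ := List.mem_flatten.mp hm
          obtain ⟨j, hj⟩ := firstIdxFrom_isSome_of_mem pre 0 ch ⟨l, hl, hcl⟩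
          have hfull := firstIdxFrom_append_left pre (cur :: rest) 0 ch j hj
          have hlt := firstIdxFrom_lt pre 0 ch j hj
          rw [hfull]
          have hne : j ≠ (pre.length : Int) := by omega
          simp [hm, hne]
        · have hfull := firstIdxFrom_append_of_notmem pre (cur :: rest) 0 ch
            (fun l hl hc => hm (List.mem_flatten.mpr ⟨l, hl, hc⟩))
          rw [hfull, firstIdxFrom, if_pos hcur]
          simp [hm]
      · -- tail
        have hcomp : (rest.map (fun l => l.filter (fun c => decide (c ∉ pre.flatten)))).map
              (fun l => l.filter (fun m => decide (m ∉ cur.filter (fun c => decide (c ∉ pre.flatten)))))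
            = rest.map (fun l => l.filter (fun c => decide (c ∉ (pre ++ [cur]).flatten))) := by
          rw [List.map_map]
          apply List.map_congr_left
          intro l _
          simp only [Function.comp, List.filter_filter]
          apply List.filter_congr
          intro m _
          by_cases h1 : m ∈ pre.flatten <;> by_cases h2 : m ∈ cur <;>
            simp_all [List.mem_filter, List.mem_flatten]
        rw [hcomp, ih (pre ++ [cur])]
        have hlen : (((pre ++ [cur]).length : Nat) : Int) = (pre.length : Int) + 1 := by
          simp
        have happ : (pre ++ [cur]) ++ rest = pre ++ cur :: rest := by
          simp
        rw [hlen, happ]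

theorem foldl_groups (l : List (Int × List String)) (g : Int × List String → List String)
    (acc : List (List String)) :
    l.foldl (fun acc p => let group := g p; if group ≠ [] then acc ++ [group] else acc) acc
      = acc ++ (l.filter (fun p => decide (g p ≠ []))).map g := by
  induction l generalizing acc with
  | nil => simp
  | cons p l ih =>
      simp only [List.foldl_cons]
      rw [ih]
      by_cases h : g p = [] <;> simp [h, List.append_assoc]

-- ===== VERDICT (by name: the statement is the Claim_ definition above) =====
theorem get_uniq_charsets_spec : Claim_equal_get_uniq_charsets := by
  intro charset user_charset _
  unfold Spec_get_uniq_charsets get_uniq_charsets get_uniq_charsets_alt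
  have hA := main_transport (charset ++ user_charset) []
  simp only [List.flatten_nil, List.not_mem_nil, not_false_iff, decide_true, List.filter_true,
    List.map_id', List.nil_append, List.length_nil, Nat.cast_zero] at hA
  show List.filter (fun x => decide (x ≠ [])) (pyALoop (charset ++ user_charset)) = _
  rw [hA, List.filter_map]
  refine Eq.trans ?_ (foldl_groups (PySem.List.enumerate (charset ++ user_charset))
    (fun p => (PySem.List.dedup p.2).filter
      (fun ch => (bOwner (charset ++ user_charset)).get? ch == some p.1)) []).symm
  simp only [List.nil_append, Function.comp_def, bOwner_get?]
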